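-- pv_equiv track=rewrite | github.com/nickelstacker/foo | network.py | getSourceIP
-- ===== SOURCE A (Python) =====
-- def getSourceIP(devices):
-- 	err = 0
--
-- 	for device in devices:
--
-- 		if ('at ' not in device):
-- 			continue
--
-- 		macAddress = device.split('at ')[1].split(' ')[0]
--
-- 		if (isPiMacAddress(macAddress)):
-- 			return str(device.split('(')[1].split(')')[0]), err
--
--
-- 	# if this point is reached, MAC is not found
-- 	# try the first (incomplete)
-- 	for device in devices:
-- 		if ('(incomplete)' in device):
-- 			return str(device.split('(')[1].split(')')[0]), err
--
-- 	err = 1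
-- 	return "Cannot find IP address of Pi", err
--
-- macPrefixes = ['B8:27:EB', 'B8-27-EB', 'B827.EB',
-- 			   'DC:A6:32', 'DC-A6-32', 'DCA6.32',
-- 			   'E4:5F:01', 'E4-5F-01', 'E45F.01',
-- 			   'E4:5F:1']
--
-- def isPiMacAddress(macAddress):
--
-- 	if (macAddress[0:8].upper() in macPrefixes):
-- 		return True
-- 	if (macAddress[0:7].upper() in macPrefixes):
-- 		return True
--
-- 	return False
-- ===== SOURCE B (Python) =====
-- macPrefixes = ['B8:27:EB', 'B8-27-EB', 'B827.EB',
--                'DC:A6:32', 'DC-A6-32', 'DCA6.32',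
--                'E4:5F:01', 'E4-5F-01', 'E45F.01',
--                'E4:5F:1']
--
--
-- def isPiMacAddress(macAddress):
--     if (macAddress[0:8].upper() in macPrefixes):
--         return True
--     if (macAddress[0:7].upper() in macPrefixes):
--         return True
--     return False
--
--
-- def getSourceIP(devices):
--     fallback = None
--     for device in devices:
--         if ('at ' in device):
--             macAddress = device.split('at ')[1].split(' ')[0]
--             if (isPiMacAddress(macAddress)):
--                 return str(device.split('(')[1].split(')')[0]), 0
--         if ('(incomplete)' in device) and fallback is None:
--             fallback = device
--     if fallback is not None:
--         return str(fallback.split('(')[1].split(')')[0]), 0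
--     return "Cannot find IP address of Pi", 1
-- ===== Notes on version B (the rewrite author's own statement) =====
-- stated objective: alternative
-- what changed: A's two sequential scans (first for a Pi MAC match, then a second full scan for the first '(incomplete)' entry) are fused into one pass that returns immediately on a Pi MAC match and remembers the first '(incomplete)' device in a fallback variable used after the loop.
import Mathlib
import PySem

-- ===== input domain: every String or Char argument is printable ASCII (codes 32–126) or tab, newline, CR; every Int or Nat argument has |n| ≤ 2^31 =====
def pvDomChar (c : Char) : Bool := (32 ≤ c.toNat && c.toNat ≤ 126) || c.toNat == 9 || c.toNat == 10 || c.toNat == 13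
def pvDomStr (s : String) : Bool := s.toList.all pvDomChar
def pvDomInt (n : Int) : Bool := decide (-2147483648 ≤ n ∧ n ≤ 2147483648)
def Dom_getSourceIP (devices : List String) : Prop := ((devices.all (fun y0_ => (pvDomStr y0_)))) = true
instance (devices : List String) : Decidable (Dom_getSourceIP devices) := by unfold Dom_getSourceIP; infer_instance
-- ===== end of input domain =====

-- B fuses A's two sequential scans into one pass with a fallback variable (objective: alternative decomposition).

-- ===== PORT A =====
def macPrefixes : List String :=
  ["B8:27:EB", "B8-27-EB", "B827.EB",
   "DC:A6:32", "DC-A6-32", "DCA6.32",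
   "E4:5F:01", "E4-5F-01", "E45F.01",
   "E4:5F:1"]

def isPiMacAddress (macAddress : String) : Bool :=
  if macPrefixes.contains (PySem.Str.upper (PySem.Str.slice macAddress (some 0) (some 8))) then
    true
  else if macPrefixes.contains (PySem.Str.upper (PySem.Str.slice macAddress (some 0) (some 7))) then
    true
  else
    false

-- device.split('at ')[1].split(' ')[0]; the [1] index is guarded by 'at ' ∈ device in both
-- Pythons, so the default "" is unreachable wherever the helper is invoked
def macOf (device : String) : String :=
  (PySem.List.pyGet?
    (((PySem.Str.split? ((PySem.List.pyGet? ((PySem.Str.split? device "at ").getD []) 1).getD "") " ").getD []))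
    0).getD ""

-- device.split('(')[1].split(')')[0]; the [1] index raises IndexError in Python when '(' ∉ device —
-- exactly the inputs Pre_ excludes; the default "" there is outside the claim
def ipOf (device : String) : String :=
  (PySem.List.pyGet?
    (((PySem.Str.split? ((PySem.List.pyGet? ((PySem.Str.split? device "(").getD []) 1).getD "") ")").getD []))
    0).getD ""

-- first loop of A: first device containing 'at ' whose MAC is a Pi MAC
def piLoop : List String → Option String
  | [] => none
  | d :: rest =>
    if PySem.Str.isIn "at " d then
      if isPiMacAddress (macOf d) then some (ipOf d) else piLoop rest
    else
      piLoop rest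

-- second loop of A: first device containing '(incomplete)'
def incompleteLoop : List String → Option String
  | [] => none
  | d :: rest =>
    if PySem.Str.isIn "(incomplete)" d then some (ipOf d) else incompleteLoop rest

def getSourceIP (devices : List String) : String × Int :=
  match piLoop devices with
  | some ip => (ip, 0)
  | none =>
    match incompleteLoop devices with
    | some ip => (ip, 0)
    | none => ("Cannot find IP address of Pi", 1)

-- ===== PORT B =====
-- single pass: return on a Pi MAC match, remember the first '(incomplete)' device as fallback
def goAlt : List String → Option String → String × Int
  | [], fallback =>
    match fallback with
    | some f => (ipOf f, 0)
    | none => ("Cannot find IP address of Pi", 1)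
  | d :: rest, fallback =>
    if PySem.Str.isIn "at " d && isPiMacAddress (macOf d) then
      (ipOf d, 0)
    else
      goAlt rest (if PySem.Str.isIn "(incomplete)" d && fallback.isNone then some d else fallback)

def getSourceIP_alt (devices : List String) : String × Int :=
  goAlt devices none

-- ===== PRECONDITION & SPEC =====
-- Pre_ excludes exactly the inputs where both Pythons raise IndexError: the first device whose
-- MAC matches a Pi prefix contains no '(' (device.split('(')[1] then raises, in A and in B alike).
def Pre_getSourceIP (devices : List String) : Prop :=
  ((devices.find? (fun d => PySem.Str.isIn "at " d && isPiMacAddress (macOf d))).all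
    (fun d => PySem.Str.isIn "(" d)) = true
instance (devices : List String) : Decidable (Pre_getSourceIP devices) := by
  unfold Pre_getSourceIP; infer_instance

def pvWitness_getSourceIP : List String :=
  ["pi.local (192.168.1.5) at b8:27:eb:12:34:56 on en0"]

def Spec_getSourceIP (devices : List String) (out : String × Int) : Prop := out = getSourceIP_alt devices
instance (devices : List String) (out : String × Int) : Decidable (Spec_getSourceIP devices out) := by unfold Spec_getSourceIP; infer_instance

-- ===== CLAIM (what is proved, stated in full; the proofs are below) =====
def Claim_equal_getSourceIP : Prop := ∀ (devices : List String), Dom_getSourceIP devices → Pre_getSourceIP devices → Spec_getSourceIP devices (getSourceIP devices)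

-- ===== LEMMAS AND PROOFS =====
-- invariant of B's loop: goAlt ds fb is A's answer on ds with fb as the pending fallback
theorem goAlt_eq (ds : List String) : ∀ fb : Option String,
    goAlt ds fb =
      match piLoop ds with
      | some ip => (ip, 0)
      | none =>
        match fb with
        | some f => (ipOf f, 0)
        | none =>
          match incompleteLoop ds with
          | some ip => (ip, 0)
          | none => ("Cannot find IP address of Pi", 1) := by
  induction ds with
  | nil => intro fb; cases fb <;> rfl
  | cons d rest ih =>
    intro fb
    cases h1 : PySem.Chars.isIn ['a','t',' '] d.toList <;>
      cases h2 : isPiMacAddress (macOf d) <;>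
        cases h3 : PySem.Chars.isIn ['(','i','n','c','o','m','p','l','e','t','e',')'] d.toList <;>
          cases fb <;>
            simp [goAlt, piLoop, incompleteLoop, h1, h2, h3, ih]

-- ===== VERDICT (by name: the statement is the Claim_ definition above) =====
theorem getSourceIP_spec : Claim_equal_getSourceIP := by
  intro devices _ _
  show getSourceIP devices = getSourceIP_alt devices
  rw [getSourceIP_alt, goAlt_eq, getSourceIP]
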